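-- pv_equiv track=rewrite | github.com/avi3tal/knowledgebase | etti/bar.py | detected_reject_keywords
-- ===== SOURCE A (Python) =====
-- def detected_reject_keywords(line):
--     keywords = [
--         "5.1.1",
--         "invalid",
--         "does not appear to exists",
--         "does not exist",
--         "User Unknown",
--         "unknown or illegal alias",
--         "does not have any DNS records"
--     ]
--     return any(k in line for k in keywords)
-- ===== SOURCE B (Python) =====
-- _REJECT_KEYWORDS = ("5.1.1", "invalid", "does not appear to exists",
--                     "does not exist", "User Unknown",
--                     "unknown or illegal alias", "does not have any DNS records")
--
-- def detected_reject_keywords(line):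
--     # position-major single scan: at each start position of the line (including
--     # the end), test whether some reject keyword begins exactly there
--     for i in range(len(line) + 1):
--         for k in _REJECT_KEYWORDS:
--             if line.startswith(k, i):
--                 return True
--     return False
-- ===== Notes on version B (the rewrite author's own statement) =====
-- stated objective: alternative
-- what changed: B replaces the keyword-major loop of seven independent substring-membership scans by one position-major pass over the line that tests, at each start position, whether some keyword begins exactly there.
import Mathlib
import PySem

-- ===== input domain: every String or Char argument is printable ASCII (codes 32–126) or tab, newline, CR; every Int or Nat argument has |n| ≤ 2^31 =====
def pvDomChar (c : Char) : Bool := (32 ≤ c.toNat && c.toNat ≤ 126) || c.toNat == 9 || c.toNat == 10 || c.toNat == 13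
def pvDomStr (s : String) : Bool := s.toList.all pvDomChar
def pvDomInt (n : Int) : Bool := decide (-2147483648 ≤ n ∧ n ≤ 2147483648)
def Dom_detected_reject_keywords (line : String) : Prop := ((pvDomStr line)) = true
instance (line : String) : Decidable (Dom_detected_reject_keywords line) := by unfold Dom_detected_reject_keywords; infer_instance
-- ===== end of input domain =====

-- B replaces A's keyword-major loop of seven 'in' scans by one position-major pass
-- over the line testing, at each position, whether any keyword starts there (alternative).

def pvKeywords : List String :=
  ["5.1.1", "invalid", "does not appear to exists", "does not exist",
   "User Unknown", "unknown or illegal alias", "does not have any DNS records"]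

-- ===== PORT A =====
def detected_reject_keywords (line : String) : Bool :=
  pvKeywords.any (fun k => PySem.Str.isIn k line)

-- ===== PORT B =====
-- B's scan: at each suffix of the line (each start position i, including i = len),
-- test line.startswith(k, i) for each keyword; stop at the first hit.
def pvScan (kws : List (List Char)) (cs : List Char) : Bool :=
  if kws.any (fun k => PySem.Chars.startswith cs k) then true
  else
    match cs with
    | [] => false
    | _ :: t => pvScan kws t

def detected_reject_keywords_alt (line : String) : Bool :=
  pvScan (pvKeywords.map String.toList) line.toList

-- ===== PRECONDITION & SPEC =====
def Spec_detected_reject_keywords (line : String) (out : Bool) : Prop := out = detected_reject_keywords_alt line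
instance (line : String) (out : Bool) : Decidable (Spec_detected_reject_keywords line out) := by unfold Spec_detected_reject_keywords; infer_instance

-- ===== CLAIM (what is proved, stated in full; the proofs are below) =====
def Claim_equal_detected_reject_keywords : Prop := ∀ (line : String), Dom_detected_reject_keywords line → Spec_detected_reject_keywords line (detected_reject_keywords line)

-- ===== LEMMAS AND PROOFS =====

lemma pvScan_true_iff (kws : List (List Char)) (cs : List Char) :
    pvScan kws cs = true ↔ ∃ k ∈ kws, k <:+: cs := by
  induction cs with
  | nil =>
      simp [pvScan, PySem.Chars.startswith_iff]
  | cons c t ih =>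
      by_cases h : kws.any (fun k => PySem.Chars.startswith (c :: t) k) = true
      · rw [pvScan, if_pos h]
        simp only [List.any_eq_true, PySem.Chars.startswith_iff] at h
        obtain ⟨k, hk, hp⟩ := h
        exact ⟨fun _ => ⟨k, hk, hp.isInfix⟩, fun _ => rfl⟩
      · rw [pvScan, if_neg h, ih]
        simp only [List.any_eq_true, PySem.Chars.startswith_iff, not_exists, not_and] at h
        constructor
        · rintro ⟨k, hk, hi⟩
          exact ⟨k, hk, hi.trans (List.suffix_cons c t).isInfix⟩
        · rintro ⟨k, hk, hi⟩
          rcases List.infix_cons_iff.mp hi with hp | hi'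
          · exact absurd hp (h k hk)
          · exact ⟨k, hk, hi'⟩

-- ===== VERDICT (by name: the statement is the Claim_ definition above) =====
theorem detected_reject_keywords_spec : Claim_equal_detected_reject_keywords := by
  intro line _
  unfold Spec_detected_reject_keywords detected_reject_keywords detected_reject_keywords_alt
  rw [Bool.eq_iff_iff]
  simp only [List.any_eq_true, PySem.Str.isIn_iff_infix, pvScan_true_iff, List.mem_map]
  constructor
  · rintro ⟨k, hk, h⟩; exact ⟨k.toList, ⟨k, hk, rfl⟩, h⟩
  · rintro ⟨l, ⟨k, hk, rfl⟩, h⟩; exact ⟨k, hk, h⟩
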